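-- pv_equiv track=rewrite | github.com/brainless-coder/100-days-of-dsa | 2dlist.py | largestColSum
-- ===== SOURCE A (Python) =====
-- def largestColSum(li):
--     n = len(li)
--     m = len(li[0])
--     sumArr = [0] * m
--     maxSum, maxIdx = -1, -1
--
--     # for i in range(n):
--     #     for j in range(m):
--     #         sumArr[j] += li[i][j]
--
--     # for i in range(m):
--     #     if sumArr[i] > maxSum:
--     #         maxSum = sumArr[i]
--     #         maxIdx = i
--
--     # Iterating column wise
--     for j in range(m):
--         sum = 0
--         for i in range(n):
--             sum += li[i][j]
--         if sum > maxSum: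
--             maxIdx = j
--             maxSum = sum
--
--     return maxSum, maxIdx
-- ===== SOURCE B (Python) =====
-- def largestColSum(li):
--     m = len(li[0])
--     sums = [0] * m
--     # row-major accumulation of column sums (one pass over the data)
--     for row in li:
--         sums = [s + x for s, x in zip(sums, row)]
--     # separate scan for the first strictly-largest column
--     best, idx = -1, -1
--     for j, s in enumerate(sums):
--         if s > best:
--             best, idx = s, j
--     return best, idx
-- ===== Notes on version B (the rewrite author's own statement) =====
-- stated objective: alternative
-- what changed: Column-major nested index loops recomputing each column sum are replaced by a row-major single pass that accumulates all column sums with zip, followed by a separate argmax scan over the sums.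
-- outside the precondition, e.g. on largestColSum([[1, 2], [3]]): A raises IndexError, B returns (4, 0)
import Mathlib
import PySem

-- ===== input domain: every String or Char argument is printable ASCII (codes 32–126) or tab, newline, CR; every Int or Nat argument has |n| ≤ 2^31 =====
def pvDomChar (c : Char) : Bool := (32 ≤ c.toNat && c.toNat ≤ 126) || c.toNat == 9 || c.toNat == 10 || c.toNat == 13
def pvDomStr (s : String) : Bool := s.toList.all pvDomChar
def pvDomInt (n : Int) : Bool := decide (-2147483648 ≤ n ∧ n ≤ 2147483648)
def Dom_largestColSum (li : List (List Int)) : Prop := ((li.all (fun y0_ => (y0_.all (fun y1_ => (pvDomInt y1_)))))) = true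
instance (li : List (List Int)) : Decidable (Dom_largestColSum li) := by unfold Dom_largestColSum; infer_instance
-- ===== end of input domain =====

-- B replaces A's column-major nested loops (recomputing each column sum by indexing)
-- with one row-major zip-accumulation pass over the rows plus a separate argmax scan.

-- ===== PORT A =====
def largestColSum (li : List (List Int)) : Int × Int :=
  let n : Int := (li.length : Int)
  let m : Int := ((PySem.List.pyGetD li 0 []).length : Int)
  -- sumArr = [0] * m is dead in A (only used by commented-out code); it is omitted
  (PySem.List.pyRange 0 m 1).foldl
    (fun (st : Int × Int) j =>
      let s : Int := (PySem.List.pyRange 0 n 1).foldl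
        (fun s i => s + PySem.List.pyGetD (PySem.List.pyGetD li i []) j 0) 0
      if s > st.1 then (s, j) else st)
    (-1, -1)

-- ===== PORT B =====
def largestColSum_alt (li : List (List Int)) : Int × Int :=
  let m : Nat := (PySem.List.pyGetD li 0 []).length
  let sums : List Int := li.foldl (fun acc row => List.zipWith (· + ·) acc row) (List.replicate m 0)
  (PySem.List.enumerate sums 0).foldl
    (fun (st : Int × Int) p => if p.2 > st.1 then (p.2, p.1) else st)
    (-1, -1)

-- ===== PRECONDITION & SPEC =====
-- Pre_: exactly the inputs where A returns: li nonempty and every row at least as long as row 0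
-- (otherwise li[0] or li[i][j] raises IndexError).
def Pre_largestColSum (li : List (List Int)) : Prop :=
  li ≠ [] ∧ ∀ row ∈ li, (li.headI).length ≤ row.length
instance (li : List (List Int)) : Decidable (Pre_largestColSum li) := by
  unfold Pre_largestColSum; infer_instance

def pvWitness_largestColSum : List (List Int) := [[1, -2, 3], [4, 5, -6]]

def Spec_largestColSum (li : List (List Int)) (out : Int × Int) : Prop := out = largestColSum_alt li
instance (li : List (List Int)) (out : Int × Int) : Decidable (Spec_largestColSum li out) := by
  unfold Spec_largestColSum; infer_instance

-- ===== CLAIM (what is proved, stated in full; the proofs are below) =====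
def Claim_equal_largestColSum : Prop := ∀ (li : List (List Int)), Dom_largestColSum li → Pre_largestColSum li → Spec_largestColSum li (largestColSum li)

-- ===== LEMMAS AND PROOFS =====

-- column sum of column k (Nat index), in row order
def colSum (li : List (List Int)) (k : Nat) : Int :=
  li.foldl (fun s row => s + row.getD k 0) 0

theorem colSum_nil (k : Nat) : colSum [] k = 0 := rfl

theorem colSum_cons (r : List Int) (li : List (List Int)) (k : Nat) :
    colSum (r :: li) k = r.getD k 0 + colSum li k := by
  simp [colSum, PySem.List.foldl_add]

-- B's accumulation pass computes exactly the column sums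
theorem sums_eq (li : List (List Int)) (m : Nat) (acc : List Int)
    (hacc : acc.length = m) (hrows : ∀ row ∈ li, m ≤ row.length) :
    li.foldl (fun acc row => List.zipWith (· + ·) acc row) acc
      = (List.range m).map (fun k => acc.getD k 0 + colSum li k) := by
  induction li generalizing acc with
  | nil =>
      simp only [List.foldl_nil, colSum_nil, add_zero]
      refine List.ext_getElem (by simp [hacc]) ?_
      intro i h1 h2
      simp only [List.getElem_map, List.getElem_range]
      rw [List.getD_eq_getElem acc 0 (by simp at h2; omega)]
  | cons r rest ih =>
      have hr : m ≤ r.length := hrows r (by simp)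
      have hlen : (List.zipWith (· + ·) acc r).length = m := by
        simp [hacc]; omega
      rw [List.foldl_cons, ih _ hlen (fun row hrow => hrows row (by simp [hrow]))]
      refine List.map_congr_left ?_
      intro k hk
      have hkm : k < m := List.mem_range.mp hk
      rw [colSum_cons, List.getD_eq_getElem _ 0 (by omega),
          List.getElem_zipWith, ← List.getD_eq_getElem acc 0 (by omega),
          ← List.getD_eq_getElem r 0 (by omega)]
      ring

-- A's inner loop over row indices is colSum
theorem inner_eq (li : List (List Int)) (k : Nat) :
    (PySem.List.pyRange 0 (li.length : Int) 1).foldl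
      (fun s i => s + PySem.List.pyGetD (PySem.List.pyGetD li i []) (k : Int) 0) 0
      = colSum li k := by
  rw [PySem.List.foldl_pyRange_zero_pyGetD' li []
        (fun s row => s + PySem.List.pyGetD row (k : Int) 0) 0]
  simp [colSum]

-- membership in enumerate
theorem mem_enumerate_elim {α : Type} (xs : List α) (s : Int) (p : Int × α)
    (h : p ∈ PySem.List.enumerate xs s) :
    ∃ k : Nat, k < xs.length ∧ p.1 = s + k ∧ xs[k]? = some p.2 := by
  induction xs generalizing s with
  | nil => simp [PySem.List.enumerate] at h
  | cons x xs ih =>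
      rw [PySem.List.enumerate_cons, List.mem_cons] at h
      rcases h with h | h
      · exact ⟨0, by simp [h]⟩
      · obtain ⟨k, hk, h1, h2⟩ := ih (s + 1) h
        exact ⟨k + 1, by simpa using hk, by push_cast; omega, by simpa using h2⟩

-- generic fold congruence: fold over the first components vs fold over the pairs
theorem foldl_fst_eq (g : Int → Int) (l : List (Int × Int))
    (h : ∀ p ∈ l, g p.1 = p.2) (st : Int × Int) :
    (l.map (·.1)).foldl (fun st j => if g j > st.1 then (g j, j) else st) st
      = l.foldl (fun st p => if p.2 > st.1 then (p.2, p.1) else st) st := by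
  induction l generalizing st with
  | nil => rfl
  | cons p l ih =>
      simp only [List.map_cons, List.foldl_cons]
      rw [h p (by simp)]
      exact ih (fun q hq => h q (by simp [hq])) _

-- ===== VERDICT (by name: the statement is the Claim_ definition above) =====
theorem largestColSum_spec : Claim_equal_largestColSum := by
  intro li _ hpre
  obtain ⟨hne, hrows⟩ := hpre
  obtain ⟨r, rest, rfl⟩ := List.exists_cons_of_ne_nil hne
  unfold Spec_largestColSum largestColSum largestColSum_alt
  simp only [PySem.List.pyGetD_zero_cons]
  have hsums : (r :: rest).foldl (fun acc row => List.zipWith (· + ·) acc row)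
      (List.replicate r.length 0) = (List.range r.length).map (fun k => colSum (r :: rest) k) := by
    rw [sums_eq (r :: rest) r.length _ (by simp) (fun row hrow => by simpa using hrows row hrow)]
    refine List.map_congr_left (fun k hk => ?_)
    simp
  rw [hsums]
  have hlen : ((List.range r.length).map (fun k => colSum (r :: rest) k)).length = r.length := by
    simp
  have hrange : PySem.List.pyRange 0 (r.length : Int) 1
      = (PySem.List.enumerate ((List.range r.length).map (fun k => colSum (r :: rest) k)) 0).map (·.1) := by
    rw [PySem.List.map_fst_enumerate, hlen]; norm_num
  rw [hrange]
  refine foldl_fst_eq _ _ ?_ (-1, -1)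
  intro p hp
  obtain ⟨k, hk, h1, h2⟩ := mem_enumerate_elim _ 0 p hp
  have hk' : k < r.length := by simpa using hk
  have h2' : p.2 = colSum (r :: rest) k := by
    rw [List.getElem?_map, List.getElem?_range hk'] at h2
    simpa using h2.symm
  rw [h1, h2']
  have hI := inner_eq (r :: rest) k
  simpa using hI
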